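-- pv_equiv track=rewrite | github.com/Caliiiiii/MD | MeCL/add_data_process.py | get_local
-- ===== SOURCE A (Python) =====
-- def get_local(tokens, target_start, sep_puncs):
--     """
--     A local context is the clause that the target word occurs. Use sep_puncs to split different clauses.
--
--     :param tokens: (list) a tokenized sentence
--     :param target_start: (int) the start idx of the target_word
--     :param sep_puncs: (list) all the punctuations that split a context
--     :return: (tuple of int) the start idx and end idx of local context
--     """
--     local_start = 1
--     local_end = local_start + len(tokens)
--     for i, w in enumerate(tokens):
--         if i < target_start and w in sep_puncs:
--             local_start = i + 1
--         if i > target_start and w in sep_puncs: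
--             local_end = i
--             break
--     return local_start, local_end
-- ===== SOURCE B (Python) =====
-- def get_local(tokens, target_start, sep_puncs):
--     n = len(tokens)
--     seps = set(sep_puncs)
--     local_start = next((i + 1 for i in range(min(target_start, n) - 1, -1, -1)
--                         if tokens[i] in seps), 1)
--     local_end = next((i for i in range(max(target_start + 1, 0), n)
--                       if tokens[i] in seps), 1 + n)
--     return local_start, local_end
-- ===== Notes on version B (the rewrite author's own statement) =====
-- stated objective: simpler
-- what changed: A's single enumerated pass with two mutable accumulators and a break is replaced by two independent bounded searches: a backward scan from min(target_start,n)-1 for the last separator before the target, and a forward scan from max(target_start+1,0) for the first separator after it (default local_end hardcoded as 1+len(tokens)); sep_puncs becomes a set built once.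
import Mathlib
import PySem

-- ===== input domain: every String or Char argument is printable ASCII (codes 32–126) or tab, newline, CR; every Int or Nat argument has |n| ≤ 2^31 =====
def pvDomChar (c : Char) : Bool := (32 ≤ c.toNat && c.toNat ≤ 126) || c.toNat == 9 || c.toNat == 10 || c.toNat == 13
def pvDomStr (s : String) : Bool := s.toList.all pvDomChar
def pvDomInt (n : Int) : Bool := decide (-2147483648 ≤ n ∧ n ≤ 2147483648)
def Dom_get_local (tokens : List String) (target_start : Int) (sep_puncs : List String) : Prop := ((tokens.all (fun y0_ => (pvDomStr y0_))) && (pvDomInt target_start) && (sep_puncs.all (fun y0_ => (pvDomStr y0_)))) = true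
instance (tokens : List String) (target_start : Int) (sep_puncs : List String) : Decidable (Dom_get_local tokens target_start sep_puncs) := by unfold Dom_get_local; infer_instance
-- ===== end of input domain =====

-- B replaces A's single enumerated pass with two independent bounded scans
-- (a backward search for the last separator before the target and a forward
-- search for the first separator after it); objective: simpler decomposition.


-- ===== PORT A =====
-- enumerate(tokens) starting at index j (called with j = 0, exactly Python's enumerate)
def pvEnumFrom (j : Nat) : List String → List (Nat × String)
  | [] => []
  | w :: rest => (j, w) :: pvEnumFrom (j + 1) rest

-- the for-loop of A: state (local_start, local_end), break on the second condition
def pvLoopA (target_start : Int) (sep_puncs : List String) :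
    List (Nat × String) → Int → Int → Int × Int
  | [], ls, le => (ls, le)
  | (i, w) :: rest, ls, le =>
    let ls' := if (i : Int) < target_start ∧ sep_puncs.contains w then (i : Int) + 1 else ls
    if (i : Int) > target_start ∧ sep_puncs.contains w then (ls', (i : Int))
    else pvLoopA target_start sep_puncs rest ls' le

def get_local (tokens : List String) (target_start : Int) (sep_puncs : List String) : Int × Int :=
  pvLoopA target_start sep_puncs (pvEnumFrom 0 tokens) 1 (1 + (tokens.length : Int))

-- ===== PORT B =====
-- next((i+1 for i in range(m-1, -1, -1) if tokens[i] in seps), 1): scan indices m-1 … 0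
def pvSearchDown (tokens sep_puncs : List String) : Nat → Int
  | 0 => 1
  | k + 1 => if sep_puncs.contains (tokens.getD k "") then (k : Int) + 1
             else pvSearchDown tokens sep_puncs k

-- next((i for i in range(s, n) if tokens[i] in seps), 1+n): scan the suffix from index s
def pvSearchUp (sep_puncs : List String) (n : Nat) : List String → Nat → Int
  | [], _ => (n : Int) + 1
  | w :: rest, i => if sep_puncs.contains w then (i : Int)
                    else pvSearchUp sep_puncs n rest (i + 1)

def get_local_alt (tokens : List String) (target_start : Int) (sep_puncs : List String) : Int × Int :=
  let n := tokens.length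
  let m := (min target_start (n : Int)).toNat
  let s := (max (target_start + 1) 0).toNat
  (pvSearchDown tokens sep_puncs m, pvSearchUp sep_puncs n (tokens.drop s) s)

-- ===== PRECONDITION & SPEC =====
def Spec_get_local (tokens : List String) (target_start : Int) (sep_puncs : List String) (out : Int × Int) : Prop := out = get_local_alt tokens target_start sep_puncs
instance (tokens : List String) (target_start : Int) (sep_puncs : List String) (out : Int × Int) : Decidable (Spec_get_local tokens target_start sep_puncs out) := by unfold Spec_get_local; infer_instance

-- ===== CLAIM (what is proved, stated in full; the proofs are below) =====
def Claim_equal_get_local : Prop := ∀ (tokens : List String) (target_start : Int) (sep_puncs : List String), Dom_get_local tokens target_start sep_puncs → Spec_get_local tokens target_start sep_puncs (get_local tokens target_start sep_puncs)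

-- ===== LEMMAS AND PROOFS =====

-- once the scan index exceeds target_start, A only looks for the break index
theorem pvLoopA_up (ts : Int) (sep : List String) (n : Nat) (l : List String) :
    ∀ (j : Nat) (ls : Int), ts < (j : Int) →
      pvLoopA ts sep (pvEnumFrom j l) ls ((n : Int) + 1) = (ls, pvSearchUp sep n l j) := by
  induction l with
  | nil => intro j ls _; simp [pvEnumFrom, pvLoopA, pvSearchUp]
  | cons w rest ih =>
    intro j ls hj
    simp only [pvEnumFrom, pvLoopA, pvSearchUp]
    have hnotlt : ¬ ((j : Int) < ts) := by omega
    by_cases hw : w ∈ sep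
    · simp [hnotlt, hj, hw]
    · simp [hnotlt, hj, hw, ih (j + 1) ls (by push_cast; omega)]

-- main invariant: below target_start, A's local_start tracks the backward search
theorem pvLoopA_down (ts : Int) (sep tokens : List String) :
    ∀ (l : List String) (j : Nat), l = tokens.drop j → j ≤ tokens.length → (j : Int) ≤ ts →
      pvLoopA ts sep (pvEnumFrom j l) (pvSearchDown tokens sep j) ((tokens.length : Int) + 1)
        = get_local_alt tokens ts sep := by
  intro l
  induction l with
  | nil =>
    intro j hdrop hjn hjts
    have hj : j = tokens.length := by
      have := List.drop_eq_nil_iff.mp hdrop.symm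
      omega
    subst hj
    have hm : (min ts (tokens.length : Int)).toNat = tokens.length := by omega
    have hs : tokens.length < (max (ts + 1) 0).toNat := by omega
    simp [pvEnumFrom, pvLoopA, get_local_alt, hm, List.drop_eq_nil_of_le (le_of_lt hs),
      pvSearchUp]
  | cons w rest ih =>
    intro j hdrop hjn hjts
    have hjlt : j < tokens.length := by
      by_contra h
      simp [List.drop_eq_nil_of_le (by omega : tokens.length ≤ j)] at hdrop
    have hw : tokens.getD j "" = w := by
      have h0 : (List.drop j tokens)[0]? = tokens[j + 0]? := List.getElem?_drop ..
      rw [← hdrop] at h0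
      simp at h0
      simp [List.getD_eq_getElem?_getD, ← h0]
    have hrest : rest = tokens.drop (j + 1) := by
      have : tokens.drop (j+1) = (tokens.drop j).drop 1 := by
        rw [List.drop_drop]
      simp [this, ← hdrop]
    by_cases hcase : (j : Int) = ts
    · -- i = target_start: neither branch fires
      simp only [pvEnumFrom, pvLoopA]
      have h1 : ¬ ((j : Int) < ts) := by omega
      have h2 : ¬ (ts < (j : Int)) := by omega
      simp only [h1, false_and, if_false, h2]
      rw [pvLoopA_up ts sep tokens.length rest (j + 1) _ (by push_cast; omega)]
      have hm : (min ts (tokens.length : Int)).toNat = j := by omega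
      have hs : (max (ts + 1) 0).toNat = j + 1 := by omega
      simp [get_local_alt, hm, hs, ← hrest]
    · -- i < target_start
      have hlt : (j : Int) < ts := by omega
      simp only [pvEnumFrom, pvLoopA]
      have h2 : ¬ (ts < (j : Int)) := by omega
      simp only [h2, false_and, if_false]
      have hstep : (if (j : Int) < ts ∧ sep.contains w = true then (j : Int) + 1
          else pvSearchDown tokens sep j) = pvSearchDown tokens sep (j + 1) := by
        simp only [pvSearchDown, hw]
        by_cases hc : w ∈ sep <;> simp [hc, hlt]
      rw [hstep]
      exact ih (j + 1) hrest (by omega) (by push_cast; omega)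

-- ===== VERDICT (by name: the statement is the Claim_ definition above) =====
theorem get_local_spec : Claim_equal_get_local := by
  intro tokens ts sep _
  unfold Spec_get_local get_local
  by_cases h : 0 ≤ ts ∧ ts ≥ 0
  · have h0 : (0 : Int) ≤ ts := h.1
    have := pvLoopA_down ts sep tokens tokens 0 (by simp) (by omega) (by exact_mod_cast h0)
    simpa [pvSearchDown, add_comm] using this
  · have hneg : ts < 0 := by omega
    rw [show (1 : Int) + (tokens.length : Int) = (tokens.length : Int) + 1 by ring]
    rw [pvLoopA_up ts sep tokens.length tokens 0 1 (by exact_mod_cast hneg)]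
    have hm : (min ts (tokens.length : Int)).toNat = 0 := by omega
    have hs : (max (ts + 1) 0).toNat = 0 := by omega
    simp [get_local_alt, hm, hs, pvSearchDown]
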